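-- pv_equiv track=rewrite | github.com/scottfyr-source/wysiwyg | WalmartSheet/generate_sheet.py | parse_raw_text
-- ===== SOURCE A (Python) =====
-- def parse_raw_text(text):
--     """Parses the Discogs raw text blob."""
--     info = {
--         'artist': '', 'title': '', 'label': '', 'cat': '',
--         'format': '', 'year': '', 'country': ''
--     }
--
--     lines = text.split('\n')
--     if not lines:
--         return info
--
--     # Line 1: Artist - Title
--     parts = lines[0].split(' - ', 1)
--     if len(parts) == 2:
--         info['artist'] = parts[0].strip()
--         info['title'] = parts[1].strip()
--     else:
--         info['artist'] = lines[0].strip()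
--
--     for line in lines:
--         if line.startswith('Label:'):
--             # "Label: MCA Records MCAC-1607" -> Label: MCA Records, Cat: MCAC-1607
--             clean = line.replace('Label:', '').strip()
--             # Simple heuristic: Split by space, last item is cat#
--             # Ideally split by " / " if multiple
--             tokens = clean.split(' ')
--             if len(tokens) > 1:
--                 info['cat'] = tokens[-1]
--                 info['label'] = " ".join(tokens[:-1]).strip()
--             else:
--                 info['label'] = clean
--
--         elif line.startswith('Format:'):
--             info['format'] = line.replace('Format:', '').strip()
--
--         elif line.startswith('Released:'):
--             info['year'] = line.replace('Released:', '').strip()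
--
--         elif line.startswith('Country:'):
--             info['country'] = line.replace('Country:', '').strip()
--
--     return info
-- ===== SOURCE B (Python) =====
-- def parse_raw_text(text):
--     """Parses the Discogs raw text blob via independent per-field last-match scans."""
--     lines = text.split('\n')
--
--     parts = lines[0].split(' - ', 1)
--     if len(parts) == 2:
--         artist, title = parts[0].strip(), parts[1].strip()
--     else:
--         artist, title = lines[0].strip(), ''
--
--     def vals(prefix):
--         return [l.replace(prefix, '').strip() for l in lines if l.startswith(prefix)]
--
--     def field(prefix):
--         v = vals(prefix)
--         return v[-1] if v else ''
--
--     label, cat = '', ''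
--     label_vals = vals('Label:')
--     if label_vals:
--         tokens = label_vals[-1].split(' ')
--         if len(tokens) > 1:
--             label, cat = ' '.join(tokens[:-1]).strip(), tokens[-1]
--         else:
--             label = label_vals[-1]
--
--     return {
--         'artist': artist, 'title': title, 'label': label, 'cat': cat,
--         'format': field('Format:'), 'year': field('Released:'), 'country': field('Country:'),
--     }
-- ===== Notes on version B (the rewrite author's own statement) =====
-- stated objective: alternative
-- what changed: A threads one mutable dict through a single loop with an if/elif chain; B makes an independent per-field scan (filter lines by prefix, map to cleaned values, take the last match) and assembles the result dict in one expression, deriving label and cat# together from the last Label line.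
-- intended difference: On inputs whose last 'Label:' line has a single-token value while some earlier 'Label:' line had a multi-token value, A returns the stale cat# left over from that earlier line, while B returns '' because the last Label line carries no cat#; last-write-wins for the whole Label field is the intended behaviour. — e.g. on parse_raw_text("X\nLabel: A B\nLabel: C"): A returns [("artist", "X"), ("title", ""), ("label", "C"), ("cat", "B"), ("format", ""), ("year", ""), ("country", "")], B returns [("artist", "X"), ("title", ""), ("label", "C"), ("cat", ""), ("format", ""), ("year", ""), ("country", "")]
import Mathlib
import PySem

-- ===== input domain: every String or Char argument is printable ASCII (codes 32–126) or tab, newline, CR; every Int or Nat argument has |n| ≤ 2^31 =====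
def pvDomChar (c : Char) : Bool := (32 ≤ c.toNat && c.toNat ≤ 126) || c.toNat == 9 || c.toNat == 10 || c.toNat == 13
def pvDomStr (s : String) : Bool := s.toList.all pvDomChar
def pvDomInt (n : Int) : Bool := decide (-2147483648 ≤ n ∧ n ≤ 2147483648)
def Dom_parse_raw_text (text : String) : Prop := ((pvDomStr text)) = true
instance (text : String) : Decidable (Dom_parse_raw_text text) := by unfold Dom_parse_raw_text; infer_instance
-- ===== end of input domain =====

-- B replaces A's single stateful loop over a mutable dict by independent per-field last-match
-- scans, deriving label and cat# together from the last Label line (alternative decomposition,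
-- same cost); on inputs where A keeps a stale cat# from an earlier Label line the two differ (D_).

-- ===== PORT A =====
-- text.split('\n')  (shared input parser: both ports and D_ read the lines this way)
def pvLines (text : String) : List String := (PySem.Str.split? text "\n").getD []  -- "\n" ≠ "", split? never none
-- line.replace('Label:', '').strip()  (the cleaned value of a Label line; shared with D_)
def pvClean (line : String) : String := PySem.Str.strip (PySem.Str.replace line "Label:" "")
-- clean.split(' ')  (sep " " ≠ "", split? never none; shared with D_)
def pvToks (clean : String) : List String := (PySem.Str.split? clean " ").getD []
-- the body of A's `for line in lines` loop, transliterated branch for branch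
def pvStepA (d : PySem.Dict String String) (line : String) : PySem.Dict String String :=
  if PySem.Str.startswith line "Label:" then
    let clean := pvClean line
    let tokens := pvToks clean
    if tokens.length > 1 then
      (d.insert "cat" ((PySem.List.pyGet? tokens (-1)).getD "")).insert "label"
        (PySem.Str.strip (PySem.Str.join " " (PySem.List.slice tokens none (some (-1)))))
    else d.insert "label" clean
  else if PySem.Str.startswith line "Format:" then
    d.insert "format" (PySem.Str.strip (PySem.Str.replace line "Format:" ""))
  else if PySem.Str.startswith line "Released:" then
    d.insert "year" (PySem.Str.strip (PySem.Str.replace line "Released:" ""))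
  else if PySem.Str.startswith line "Country:" then
    d.insert "country" (PySem.Str.strip (PySem.Str.replace line "Country:" ""))
  else d

def parse_raw_text (text : String) : List (String × String) :=
  let info : PySem.Dict String String := PySem.Dict.ofList
    [("artist", ""), ("title", ""), ("label", ""), ("cat", ""),
     ("format", ""), ("year", ""), ("country", "")]
  let lines := pvLines text
  match lines with
  | [] => info.items
  | line0 :: tl =>
    let parts := (PySem.Str.splitMax? line0 " - " 1).getD []   -- " - " ≠ "", never none
    let info1 :=
      if parts.length == 2 then
        (info.insert "artist" (PySem.Str.strip ((PySem.List.pyGet? parts 0).getD ""))).insert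
          "title" (PySem.Str.strip ((PySem.List.pyGet? parts 1).getD ""))
      else info.insert "artist" (PySem.Str.strip line0)
    ((line0 :: tl).foldl pvStepA info1).items

-- ===== PORT B =====
-- Source B's helper `vals(prefix)`: cleaned values of all lines carrying that prefix
def pvVals (lines : List String) (pre : String) : List String :=
  (lines.filter (fun l => PySem.Str.startswith l pre)).map
    (fun l => PySem.Str.strip (PySem.Str.replace l pre ""))

-- Source B's helper `field(prefix)`: last matching value, or ''
def pvField (lines : List String) (pre : String) : String :=
  ((pvVals lines pre).getLast?).getD ""

def parse_raw_text_alt (text : String) : List (String × String) :=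
  let lines := pvLines text
  let line0 := (PySem.List.pyGet? lines 0).getD ""      -- lines[0]; split? never yields []
  let parts := (PySem.Str.splitMax? line0 " - " 1).getD []
  let at_ : String × String :=
    if parts.length == 2 then
      (PySem.Str.strip ((PySem.List.pyGet? parts 0).getD ""),
       PySem.Str.strip ((PySem.List.pyGet? parts 1).getD ""))
    else (PySem.Str.strip line0, "")
  let lc : String × String :=            -- (label, cat) from the last Label line, if any
    match (pvVals lines "Label:").getLast? with
    | some v =>
      let toks := (PySem.Str.split? v " ").getD []
      if toks.length > 1 then
        (PySem.Str.strip (PySem.Str.join " " (PySem.List.slice toks none (some (-1)))),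
         (PySem.List.pyGet? toks (-1)).getD "")
      else (v, "")
    | none => ("", "")
  [("artist", at_.1), ("title", at_.2), ("label", lc.1), ("cat", lc.2),
   ("format", pvField lines "Format:"), ("year", pvField lines "Released:"),
   ("country", pvField lines "Country:")]

-- ===== PRECONDITION & SPEC =====
-- conditions on the INPUT for D_: a line starting with 'Label:'; its cleaned value carrying a
-- catalogue number, i.e. being more than one space-separated token
def pvIsLabel (l : String) : Bool := PySem.Str.startswith l "Label:"
def pvDHasCat (l : String) : Bool := (pvToks (pvClean l)).length > 1
def pvDLastNoCat (ls : List String) : Bool :=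
  match ls.getLast? with
  | some l => !pvDHasCat l
  | none => false

-- On inputs whose last 'Label:' line has a single-token value while some earlier 'Label:' line
-- had a multi-token value, A returns the stale cat# left over from that earlier line, while B
-- returns '' (the last Label line carries no cat#); last-write-wins is the intended behaviour.
def D_parse_raw_text (text : String) : Prop :=
  pvDLastNoCat ((pvLines text).filter pvIsLabel) = true ∧
  ((pvLines text).filter pvIsLabel).any pvDHasCat = true
instance (text : String) : Decidable (D_parse_raw_text text) := by unfold D_parse_raw_text; infer_instance

def Spec_parse_raw_text (text : String) (out : List (String × String)) : Prop :=
  ¬ D_parse_raw_text text → out = parse_raw_text_alt text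
instance (text : String) (out : List (String × String)) : Decidable (Spec_parse_raw_text text out) := by unfold Spec_parse_raw_text; infer_instance

def pvDiffWitness_parse_raw_text : String := "X\nLabel: A B\nLabel: C"
def pvDiffWitnessOut_parse_raw_text : (List (String × String)) × (List (String × String)) :=
  ([("artist", "X"), ("title", ""), ("label", "C"), ("cat", "B"),
    ("format", ""), ("year", ""), ("country", "")],
   [("artist", "X"), ("title", ""), ("label", "C"), ("cat", ""),
    ("format", ""), ("year", ""), ("country", "")])

-- ===== CLAIM (what is proved, stated in full; the proofs are below) =====
def Claim_unchanged_parse_raw_text : Prop := ∀ (text : String), Dom_parse_raw_text text → Spec_parse_raw_text text (parse_raw_text text)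
def Claim_changed_parse_raw_text : Prop := Dom_parse_raw_text (pvDiffWitness_parse_raw_text) ∧ D_parse_raw_text (pvDiffWitness_parse_raw_text) ∧ parse_raw_text (pvDiffWitness_parse_raw_text) = pvDiffWitnessOut_parse_raw_text.1 ∧ parse_raw_text_alt (pvDiffWitness_parse_raw_text) = pvDiffWitnessOut_parse_raw_text.2 ∧ pvDiffWitnessOut_parse_raw_text.1 ≠ pvDiffWitnessOut_parse_raw_text.2
def Claim_exact_parse_raw_text : Prop := ∀ (text : String), Dom_parse_raw_text text → D_parse_raw_text text → parse_raw_text text ≠ parse_raw_text_alt text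

-- ===== LEMMAS AND PROOFS =====

-- last-match view of the label heuristic (proof-only)
def pvLabelF (v : String) : String :=
  let toks := (PySem.Str.split? v " ").getD []
  if toks.length > 1 then
    PySem.Str.strip (PySem.Str.join " " (PySem.List.slice toks none (some (-1))))
  else v

def pvCatF (v : String) : String :=
  (PySem.List.pyGet? ((PySem.Str.split? v " ").getD []) (-1)).getD ""

-- A's dict state, keyed literally (proof-only view of the 7-key dict)
def pvMkD (a t l c f y co : String) : PySem.Dict String String :=
  PySem.Dict.mk [("artist", a), ("title", t), ("label", l), ("cat", c),
    ("format", f), ("year", y), ("country", co)]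

theorem pv_ins_artist_title (w v : String) :
    ((PySem.Dict.ofList [("artist", ""), ("title", ""), ("label", ""), ("cat", ""),
        ("format", ""), ("year", ""), ("country", "")]).insert "artist" w).insert "title" v
    = pvMkD w v "" "" "" "" "" := rfl

theorem pv_ins_artist (w : String) :
    (PySem.Dict.ofList [("artist", ""), ("title", ""), ("label", ""), ("cat", ""),
        ("format", ""), ("year", ""), ("country", "")]).insert "artist" w
    = pvMkD w "" "" "" "" "" "" := rfl

theorem pv_items_mkD (a t l c f y co : String) :
    (pvMkD a t l c f y co).items = [("artist", a), ("title", t), ("label", l), ("cat", c),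
      ("format", f), ("year", y), ("country", co)] := rfl

-- two of A's four prefixes cannot head the same line (their first characters differ)
theorem pv_excl (cs : List Char) (c d : Char) (p q : List Char) (hcd : c ≠ d)
    (h : PySem.Chars.startswith cs (c :: p) = true) :
    PySem.Chars.startswith cs (d :: q) = false := by
  rw [PySem.Chars.startswith_iff] at h
  obtain ⟨r, hr⟩ := h
  rw [Bool.eq_false_iff]
  intro hq
  rw [PySem.Chars.startswith_iff] at hq
  subst hr
  rw [List.cons_append, List.cons_prefix_cons] at hq
  exact hcd hq.1.symm

-- A's loop, run from any dict of this shape, computes last-match scans per field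
theorem pv_loopA (lines : List String) : ∀ (a t l c f y co : String),
    lines.foldl pvStepA (pvMkD a t l c f y co) =
    pvMkD a t
      (((pvVals lines "Label:").getLast?.map pvLabelF).getD l)
      ((((pvVals lines "Label:").filter
          (fun v => ((PySem.Str.split? v " ").getD []).length > 1)).getLast?.map pvCatF).getD c)
      (((pvVals lines "Format:").getLast?).getD f)
      (((pvVals lines "Released:").getLast?).getD y)
      (((pvVals lines "Country:").getLast?).getD co) := by
  induction lines using List.reverseRecOn with
  | nil => intro a t l c f y co; simp [pvVals]
  | append_singleton ls x ih =>
    intro a t l c f y co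
    rw [List.foldl_append, ih]
    by_cases h1 : PySem.Str.startswith x "Label:" = true
    · have h1c : PySem.Chars.startswith x.toList ['L','a','b','e','l',':'] = true := by simpa using h1
      have e2c : PySem.Chars.startswith x.toList ['F','o','r','m','a','t',':'] = false := by
        simpa using pv_excl x.toList 'L' 'F' "abel:".toList "ormat:".toList (by decide) (by simpa using h1)
      have e3c : PySem.Chars.startswith x.toList ['R','e','l','e','a','s','e','d',':'] = false := by
        simpa using pv_excl x.toList 'L' 'R' "abel:".toList "eleased:".toList (by decide) (by simpa using h1)
      have e4c : PySem.Chars.startswith x.toList ['C','o','u','n','t','r','y',':'] = false := by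
        simpa using pv_excl x.toList 'L' 'C' "abel:".toList "ountry:".toList (by decide) (by simpa using h1)
      by_cases h5 : ((PySem.Str.split? (PySem.Str.strip (PySem.Str.replace x "Label:" "")) " ").getD []).length > 1
      · simp [pvStepA, pvClean, pvToks, pvVals, pvLabelF, pvCatF, pvMkD, h1c, e2c, e3c, e4c, h5,
          List.filter_append]
        rfl
      · simp [pvStepA, pvClean, pvToks, pvVals, pvLabelF, pvMkD, h1c, e2c, e3c, e4c, h5,
          List.filter_append]
        rfl
    · have h1f : PySem.Str.startswith x "Label:" = false := by simpa using h1
      have h1c : PySem.Chars.startswith x.toList ['L','a','b','e','l',':'] = false := by simpa using h1f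
      by_cases h2 : PySem.Str.startswith x "Format:" = true
      · have h2c : PySem.Chars.startswith x.toList ['F','o','r','m','a','t',':'] = true := by simpa using h2
        have e3c : PySem.Chars.startswith x.toList ['R','e','l','e','a','s','e','d',':'] = false := by
          simpa using pv_excl x.toList 'F' 'R' "ormat:".toList "eleased:".toList (by decide)
            (by simpa using h2)
        have e4c : PySem.Chars.startswith x.toList ['C','o','u','n','t','r','y',':'] = false := by
          simpa using pv_excl x.toList 'F' 'C' "ormat:".toList "ountry:".toList (by decide)
            (by simpa using h2)
        simp [pvStepA, pvVals, pvMkD, h1c, h2c, e3c, e4c,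
          List.filter_append]
        rfl
      · have h2f : PySem.Str.startswith x "Format:" = false := by simpa using h2
        have h2c : PySem.Chars.startswith x.toList ['F','o','r','m','a','t',':'] = false := by simpa using h2f
        by_cases h3 : PySem.Str.startswith x "Released:" = true
        · have h3c : PySem.Chars.startswith x.toList ['R','e','l','e','a','s','e','d',':'] = true := by
            simpa using h3
          have e4c : PySem.Chars.startswith x.toList ['C','o','u','n','t','r','y',':'] = false := by
            simpa using pv_excl x.toList 'R' 'C' "eleased:".toList "ountry:".toList (by decide)
              (by simpa using h3)
          simp [pvStepA, pvVals, pvMkD, h1c, h2c, h3c, e4c,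
            List.filter_append]
          rfl
        · have h3f : PySem.Str.startswith x "Released:" = false := by simpa using h3
          have h3c : PySem.Chars.startswith x.toList ['R','e','l','e','a','s','e','d',':'] = false := by
            simpa using h3f
          by_cases h4 : PySem.Str.startswith x "Country:" = true
          · have h4c : PySem.Chars.startswith x.toList ['C','o','u','n','t','r','y',':'] = true := by
              simpa using h4
            simp [pvStepA, pvVals, pvMkD, h1c, h2c, h3c, h4c,
              List.filter_append]
            rfl
          · have h4f : PySem.Str.startswith x "Country:" = false := by simpa using h4
            have h4c : PySem.Chars.startswith x.toList ['C','o','u','n','t','r','y',':'] = false := by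
              simpa using h4f
            simp [pvStepA, pvVals, pvMkD, h1c, h2c, h3c, h4c,
              List.filter_append]

-- if the last element of l satisfies p, filtering keeps it last
theorem pv_getLast_filter {α : Type} (p : α → Bool) (l : List α) (v : α)
    (h : l.getLast? = some v) (hp : p v = true) : (l.filter p).getLast? = some v := by
  induction l using List.reverseRecOn with
  | nil => simp at h
  | append_singleton ls x _ =>
    rw [List.getLast?_concat] at h
    obtain rfl : x = v := by simpa using h
    rw [List.filter_append]
    simp [hp]

-- B's label-value list is the cleaned Label lines (same parse, proof-only bridge)
theorem pv_lv_eq (lines : List String) :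
    pvVals lines "Label:" = (lines.filter pvIsLabel).map pvClean := rfl

-- outside D_, A's stale-cat scan agrees with B's last-Label-line cat
theorem pv_cat_eq (text : String) (hD : ¬ D_parse_raw_text text) :
    (((pvVals (pvLines text) "Label:").filter
        (fun v => ((PySem.Str.split? v " ").getD []).length > 1)).getLast?.map pvCatF).getD ""
    = (match (pvVals (pvLines text) "Label:").getLast? with
       | some v =>
         if ((PySem.Str.split? v " ").getD []).length > 1 then
           (PySem.List.pyGet? ((PySem.Str.split? v " ").getD []) (-1)).getD ""
         else ""
       | none => "") := by
  unfold D_parse_raw_text at hD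
  rw [pv_lv_eq]
  set L := (pvLines text).filter pvIsLabel with hL
  cases hgl : L.getLast? with
  | none =>
    have : L = [] := List.getLast?_eq_none_iff.mp hgl
    simp [this]
  | some l =>
    have hglm : (L.map pvClean).getLast? = some (pvClean l) := by
      rw [List.getLast?_map, hgl]; rfl
    by_cases hm : pvDHasCat l = true
    · have hm' : ((PySem.Str.split? (pvClean l) " ").getD []).length > 1 := by
        simpa [pvDHasCat] using hm
      rw [pv_getLast_filter _ _ (pvClean l) hglm (by simpa using hm'), hglm]
      simp [hm', pvCatF]
    · have hlast : pvDLastNoCat L = true := by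
        simp [pvDLastNoCat, hgl, Bool.eq_false_iff.mpr hm]
      have hany : L.any pvDHasCat = false := by
        by_contra hc
        exact hD ⟨hlast, by simpa using hc⟩
      have hfil : (L.map pvClean).filter
          (fun v => decide (((PySem.Str.split? v " ").getD []).length > 1)) = [] := by
        rw [List.filter_map]
        have hcmp : ((fun v => decide (((PySem.Str.split? v " ").getD []).length > 1)) ∘ pvClean)
            = pvDHasCat := by
          funext v
          simp [pvDHasCat, pvToks]
        rw [hcmp, List.map_eq_nil_iff, List.filter_eq_nil_iff]
        intro a ha
        simpa using List.any_eq_false.mp hany a ha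
      rw [hfil, hglm]
      have hm2 : ¬ ((PySem.Str.split? (pvClean l) " ").getD []).length > 1 := by
        simpa [pvDHasCat, pvToks] using hm
      simp [hm2]

-- lemmas for the tightness theorem: the last space-token of a stripped string is nonempty

theorem pv_getLast_cons {α : Type} (a : α) (l : List α) (h : l ≠ []) :
    (a :: l).getLast? = l.getLast? := by
  cases l with
  | nil => exact absurd rfl h
  | cons b t => simp [List.getLast?_cons_cons]

theorem pv_go_last (fuel : Nat) : ∀ (l cur : List Char) (acc : List (List Char)),
    l.length ≤ fuel → (l ≠ [] → l.getLast? ≠ some ' ') → (l ≠ [] ∨ cur ≠ []) →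
    ∃ z, (PySem.Chars.splitOn.go [' '] fuel l cur acc).getLast? = some z ∧ z ≠ [] := by
  induction fuel with
  | zero =>
    intro l cur acc hlen _ hne
    have hl : l = [] := by cases l with | nil => rfl | cons a t => simp at hlen
    subst hl
    refine ⟨cur.reverse ++ [], ?_, ?_⟩
    · simp [PySem.Chars.splitOn.go]
    · simpa using hne.resolve_left (by simp)
  | succ n ih =>
    intro l cur acc hlen hsp hne
    cases l with
    | nil =>
      refine ⟨cur.reverse, ?_, ?_⟩
      · simp [PySem.Chars.splitOn.go]
      · simpa using hne.resolve_left (by simp)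
    | cons c rest =>
      by_cases hc : c = ' '
      · subst hc
        have hpre : ([' '].isPrefixOf (' ' :: rest)) = true := by simp [List.isPrefixOf]
        have hrest : rest ≠ [] := by
          intro h; subst h
          exact hsp (by simp) (by simp)
        have hstep : PySem.Chars.splitOn.go [' '] (n+1) (' ' :: rest) cur acc
            = PySem.Chars.splitOn.go [' '] n rest [] (cur.reverse :: acc) := by
          simp [PySem.Chars.splitOn.go, hpre]
        rw [hstep]
        exact ih rest [] _ (by simpa using Nat.le_of_succ_le_succ (by simpa using hlen))
          (fun _ => by
            have := hsp (by simp)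
            rwa [pv_getLast_cons _ _ hrest] at this)
          (Or.inl hrest)
      · have hpre : ([' '].isPrefixOf (c :: rest)) = false := by
          simp [List.isPrefixOf]
          exact fun h => hc h.symm
        have hstep : PySem.Chars.splitOn.go [' '] (n+1) (c :: rest) cur acc
            = PySem.Chars.splitOn.go [' '] n rest (c :: cur) acc := by
          simp [PySem.Chars.splitOn.go, hpre]
        rw [hstep]
        refine ih rest (c :: cur) acc (by simpa using Nat.le_of_succ_le_succ (by simpa using hlen))
          (fun hr => ?_) (Or.inr (by simp))
        have := hsp (by simp)
        rwa [pv_getLast_cons _ _ hr] at this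

-- last piece of splitting a string whose last char is not ' ' is nonempty
theorem pv_splitOn_last (cs : List Char) (hne : cs ≠ []) (hl : cs.getLast? ≠ some ' ') :
    ∃ z, (PySem.Chars.splitOn cs [' ']).getLast? = some z ∧ z ≠ [] := by
  unfold PySem.Chars.splitOn
  exact pv_go_last (cs.length + 1) cs [] [] (by omega) (fun _ => hl) (Or.inl hne)

theorem pv_head_dropWhile (l : List Char) (p : Char → Bool) (c : Char)
    (h : (l.dropWhile p).head? = some c) : ¬ p c = true := by
  induction l with
  | nil => simp at h
  | cons a t ih =>
    by_cases hp : p a = true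
    · rw [List.dropWhile_cons_of_pos hp] at h; exact ih h
    · rw [List.dropWhile_cons_of_neg hp] at h
      simp at h; subst h; exact hp

-- a stripped string never ends in ' '
theorem pv_strip_last (t : List Char) : (PySem.Chars.strip t).getLast? ≠ some ' ' := by
  intro h
  unfold PySem.Chars.strip PySem.Chars.rstrip at h
  rw [List.getLast?_reverse] at h
  exact pv_head_dropWhile _ _ _ h (by decide)

theorem pv_pyGet_neg_one {α : Type} (xs : List α) (h : xs ≠ []) :
    PySem.List.pyGet? xs (-1) = xs.getLast? := by
  have hn : 0 < xs.length := List.length_pos_of_ne_nil h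
  simp [PySem.List.pyGet?, PySem.List.pyIdx?, show -(xs.length:Int) ≤ -1 by omega, List.getLast?_eq_getElem?]


theorem pv_catF_ne (w : String) (hw : w.toList.getLast? ≠ some ' ')
    (hm : ((PySem.Str.split? w " ").getD []).length > 1) : pvCatF w ≠ "" := by
  have hsplit : (PySem.Str.split? w " ").getD []
      = (PySem.Chars.splitOn w.toList [' ']).map String.ofList := by
    simp [PySem.Str.split?, PySem.Chars.split?]
  have hne : w.toList ≠ [] := by
    intro h0
    rw [hsplit, h0] at hm
    simp [PySem.Chars.splitOn, PySem.Chars.splitOn.go] at hm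
  obtain ⟨z, hz, hzne⟩ := pv_splitOn_last w.toList hne hw
  unfold pvCatF
  have hmapne : (PySem.Chars.splitOn w.toList [' ']).map String.ofList ≠ [] := by
    rw [hsplit] at hm
    exact List.ne_nil_of_length_pos (by omega)
  rw [hsplit, pv_pyGet_neg_one _ hmapne, List.getLast?_map, hz]
  intro hc
  apply hzne
  simpa using congrArg String.toList (by simpa using hc : String.ofList z = "")

-- ===== VERDICT (by name: the statement is the Claim_ definition above) =====
theorem parse_raw_text_spec : Claim_unchanged_parse_raw_text := by
  intro text _
  unfold Spec_parse_raw_text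
  intro hD
  have hcat := pv_cat_eq text hD
  unfold parse_raw_text parse_raw_text_alt
  cases hl : pvLines text with
  | nil => rfl
  | cons L0 rest =>
    rw [hl] at hcat
    have hL0 : (PySem.List.pyGet? (L0 :: rest) 0).getD "" = L0 := by
      simp [PySem.List.pyGet?, PySem.List.pyIdx?]
    simp only [hL0]
    by_cases hp : (((PySem.Str.splitMax? L0 " - " 1).getD []).length == 2) = true
    · rw [if_pos hp, if_pos hp, pv_ins_artist_title, pv_loopA, pv_items_mkD]
      rw [hcat]
      cases hgl : (pvVals (L0 :: rest) "Label:").getLast? with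
      | none => simp [pvField]
      | some v =>
        by_cases hm : ((PySem.Str.split? v " ").getD []).length > 1 <;>
          simp [hm, pvLabelF, pvField]
    · rw [if_neg hp, if_neg hp, pv_ins_artist, pv_loopA, pv_items_mkD]
      rw [hcat]
      cases hgl : (pvVals (L0 :: rest) "Label:").getLast? with
      | none => simp [pvField]
      | some v =>
        by_cases hm : ((PySem.Str.split? v " ").getD []).length > 1 <;>
          simp [hm, pvLabelF, pvField]

theorem parse_raw_text_changed : Claim_changed_parse_raw_text := by
  unfold Claim_changed_parse_raw_text; decide

theorem parse_raw_text_tight : Claim_exact_parse_raw_text := by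
  intro text _ hD hEq
  obtain ⟨h1, h2⟩ := hD
  cases hgl0 : ((pvLines text).filter pvIsLabel).getLast? with
  | none => simp [pvDLastNoCat, hgl0] at h1
  | some llast =>
    have hnc : pvDHasCat llast = false := by
      simp [pvDLastNoCat, hgl0] at h1
      simpa using h1
    have hLne : (pvLines text).filter pvIsLabel ≠ [] := by
      intro h0
      rw [h0] at hgl0
      simp at hgl0
    cases hl : pvLines text with
    | nil => exact hLne (by rw [hl]; rfl)
    | cons L0 rest =>
      rw [hl] at hgl0 h2
      -- B's last Label value and its (absent) cat
      have hlvlast : (pvVals (L0 :: rest) "Label:").getLast? = some (pvClean llast) := by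
        rw [pv_lv_eq, List.getLast?_map, hgl0]
        rfl
      have hnotm : ¬ ((PySem.Str.split? (pvClean llast) " ").getD []).length > 1 := by
        simpa [pvDHasCat, pvToks] using hnc
      -- a multi-token Label value exists, so A's stale-cat filter is nonempty
      obtain ⟨lm, hlmmem, hlmcat⟩ := List.any_eq_true.mp h2
      have hvm_mem : pvClean lm ∈ (pvVals (L0 :: rest) "Label:").filter
          (fun v => decide (((PySem.Str.split? v " ").getD []).length > 1)) := by
        refine List.mem_filter.mpr ⟨?_, by simpa [pvDHasCat, pvToks] using hlmcat⟩
        rw [pv_lv_eq]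
        exact List.mem_map_of_mem hlmmem
      cases hgf : ((pvVals (L0 :: rest) "Label:").filter
          (fun v => decide (((PySem.Str.split? v " ").getD []).length > 1))).getLast? with
      | none =>
        rw [List.getLast?_eq_none_iff] at hgf
        rw [hgf] at hvm_mem
        simp at hvm_mem
      | some vm =>
        have hvm := List.mem_filter.mp (List.mem_of_getLast? hgf)
        obtain ⟨l2, _, hl2⟩ := List.mem_map.mp (by rw [pv_lv_eq] at hvm; exact hvm.1)
        have hcatne : pvCatF vm ≠ "" := by
          rw [← hl2]
          refine pv_catF_ne (pvClean l2) ?_ (by rw [hl2]; simpa using hvm.2)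
          simp only [pvClean, PySem.Str.toList_strip]
          exact pv_strip_last _
        -- reduce both programs' 'cat' entries out of the assumed equality
        unfold parse_raw_text parse_raw_text_alt at hEq
        rw [hl] at hEq
        have hL0 : (PySem.List.pyGet? (L0 :: rest) 0).getD "" = L0 := by
          simp [PySem.List.pyGet?, PySem.List.pyIdx?]
        simp only [hL0] at hEq
        by_cases hp : (((PySem.Str.splitMax? L0 " - " 1).getD []).length == 2) = true
        · rw [if_pos hp, if_pos hp, pv_ins_artist_title, pv_loopA, pv_items_mkD] at hEq
          have h3 := congrArg (fun u => u[3]?) hEq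
          simp only [hgf, hlvlast] at h3
          simp [hnotm] at h3
          exact hcatne h3
        · rw [if_neg hp, if_neg hp, pv_ins_artist, pv_loopA, pv_items_mkD] at hEq
          have h3 := congrArg (fun u => u[3]?) hEq
          simp only [hgf, hlvlast] at h3
          simp [hnotm] at h3
          exact hcatne h3
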